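-- pv_equiv track=rewrite | github.com/pytorch/torchtitan | torchtitan/experiments/graph_trainer/log_activation_memory_policy.py | _parse_stack_frames
-- ===== SOURCE A (Python) =====
-- def _parse_stack_frames(
--     stack_trace: str,
-- ) -> list[tuple[str, str, str]]:
--     raw_lines = stack_trace.strip().splitlines()
--     frames = []
--     i = 0
--     while i < len(raw_lines):
--         line = raw_lines[i].strip()
--         if line.startswith("File "):
--             parts = line.split(", ")
--             path = parts[0].removeprefix("File ").strip('"')
--             lineno = parts[1].removeprefix("line ").strip() if len(parts) >= 2 else "?"
--             code = ""
--             if i + 1 < len(raw_lines) and not raw_lines[i + 1].strip().startswith(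
--                 "File "
--             ):
--                 code = raw_lines[i + 1].strip()
--                 i += 1
--             frames.append((path, lineno, code))
--         i += 1
--     return frames
-- ===== SOURCE B (Python) =====
-- def _parse_stack_frames(
--     stack_trace: str,
-- ) -> list[tuple[str, str, str]]:
--     # State-machine pass: keep a pending frame and fill its code from the
--     # first following non-"File " line; flush pending on each "File " line.
--     frames = []
--     pending = None
--     code_set = False
--     for raw in stack_trace.strip().splitlines():
--         line = raw.strip()
--         if line.startswith("File "):
--             if pending is not None:
--                 frames.append(pending)
--             parts = line.split(", ")
--             path = parts[0].removeprefix("File ").strip('"')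
--             lineno = parts[1].removeprefix("line ").strip() if len(parts) >= 2 else "?"
--             pending = (path, lineno, "")
--             code_set = False
--         elif pending is not None and not code_set:
--             pending = (pending[0], pending[1], line)
--             code_set = True
--     if pending is not None:
--         frames.append(pending)
--     return frames
-- ===== Notes on version B (the rewrite author's own statement) =====
-- stated objective: alternative
-- what changed: Replaced A's index-based while loop with manual lookahead (peek at raw_lines[i+1] and skip it via i += 1) by a single state-machine pass that carries a pending frame plus a code_set flag and flushes the pending frame on each new 'File ' line or at the end.
import Mathlib
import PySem

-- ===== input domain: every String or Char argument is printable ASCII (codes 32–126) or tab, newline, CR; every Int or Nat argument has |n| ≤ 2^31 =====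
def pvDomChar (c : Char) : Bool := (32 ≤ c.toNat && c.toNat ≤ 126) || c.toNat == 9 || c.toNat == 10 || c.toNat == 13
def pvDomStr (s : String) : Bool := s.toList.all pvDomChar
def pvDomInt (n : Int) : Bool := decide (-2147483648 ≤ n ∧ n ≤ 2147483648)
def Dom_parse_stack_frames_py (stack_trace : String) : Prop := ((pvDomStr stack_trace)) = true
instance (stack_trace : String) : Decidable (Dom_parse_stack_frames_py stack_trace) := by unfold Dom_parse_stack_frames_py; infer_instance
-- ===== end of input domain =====

-- B replaces A's index loop with lookahead/skip by a pending-frame state machine; same output, same cost (objective: alternative).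

-- s.removeprefix(p): exact port of Python's str.removeprefix
def pvRemoveprefix (s p : String) : String :=
  if PySem.Str.startswith s p then String.ofList (s.toList.drop p.toList.length) else s

-- the parsing of a stripped "File " line into (path, lineno); identical inline code in both Pythons
def pvParseFileLine (line : String) : String × String :=
  let parts := (PySem.Str.split? line ", ").getD []
  let path := PySem.Str.stripChars (pvRemoveprefix (parts.headD "") "File ") "\""
  let lineno := if 2 ≤ parts.length then PySem.Str.strip (pvRemoveprefix (parts.getD 1 "") "line ") else "?"
  (path, lineno)

-- ===== PORT A =====
-- A's while loop over raw_lines with lookahead at i+1 and manual skip (i += 1 inside the branch),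
-- transliterated as recursion on the remaining suffix of raw_lines (skip = recurse on tail of tail).
def pvALoop (raw_lines : List String) : List (String × String × String) :=
  match raw_lines with
  | [] => []
  | l :: rest =>
    let line := PySem.Str.strip l
    if PySem.Str.startswith line "File " then
      match rest with
      | next :: rest' =>
        if !(PySem.Str.startswith (PySem.Str.strip next) "File ") then
          ((pvParseFileLine line).1, (pvParseFileLine line).2, PySem.Str.strip next) :: pvALoop rest'
        else
          ((pvParseFileLine line).1, (pvParseFileLine line).2, "") :: pvALoop (next :: rest')
      | [] => ((pvParseFileLine line).1, (pvParseFileLine line).2, "") :: pvALoop []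
    else pvALoop rest

def parse_stack_frames_py (stack_trace : String) : List (String × String × String) :=
  pvALoop (PySem.Str.splitlines (PySem.Str.strip stack_trace))

-- ===== PORT B =====
-- B's for loop over the lines, carrying (frames, pending, code_set); flush pending at the end.
def pvBLoop (lines : List String) (frames : List (String × String × String))
    (pending : Option (String × String × String)) (code_set : Bool) :
    List (String × String × String) :=
  match lines with
  | [] => frames ++ pending.toList
  | raw :: rest =>
    let line := PySem.Str.strip raw
    if PySem.Str.startswith line "File " then
      pvBLoop rest (frames ++ pending.toList)
        (some ((pvParseFileLine line).1, (pvParseFileLine line).2, "")) false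
    else
      match pending, code_set with
      | some p, false => pvBLoop rest frames (some (p.1, p.2.1, line)) true
      | _, _ => pvBLoop rest frames pending code_set

def parse_stack_frames_py_alt (stack_trace : String) : List (String × String × String) :=
  pvBLoop (PySem.Str.splitlines (PySem.Str.strip stack_trace)) [] none false

-- ===== PRECONDITION & SPEC =====
def Spec_parse_stack_frames_py (stack_trace : String) (out : List (String × String × String)) : Prop := out = parse_stack_frames_py_alt stack_trace
instance (stack_trace : String) (out : List (String × String × String)) : Decidable (Spec_parse_stack_frames_py stack_trace out) := by unfold Spec_parse_stack_frames_py; infer_instance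

-- ===== CLAIM (what is proved, stated in full; the proofs are below) =====
def Claim_equal_parse_stack_frames_py : Prop := ∀ (stack_trace : String), Dom_parse_stack_frames_py stack_trace → Spec_parse_stack_frames_py stack_trace (parse_stack_frames_py stack_trace)

-- ===== LEMMAS AND PROOFS =====

-- one-step unfolding of pvALoop on a cons cell
theorem pvALoop_cons (l : String) (rest : List String) :
    pvALoop (l :: rest) =
      (if PySem.Str.startswith (PySem.Str.strip l) "File " then
        match rest with
        | next :: rest' =>
          if !(PySem.Str.startswith (PySem.Str.strip next) "File ") then
            ((pvParseFileLine (PySem.Str.strip l)).1, (pvParseFileLine (PySem.Str.strip l)).2,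
              PySem.Str.strip next) :: pvALoop rest'
          else
            ((pvParseFileLine (PySem.Str.strip l)).1, (pvParseFileLine (PySem.Str.strip l)).2,
              "") :: pvALoop (next :: rest')
        | [] =>
          ((pvParseFileLine (PySem.Str.strip l)).1, (pvParseFileLine (PySem.Str.strip l)).2,
            "") :: pvALoop []
       else pvALoop rest) := by
  rw [pvALoop.eq_def]

-- one-step unfolding of pvBLoop on a cons cell
theorem pvBLoop_cons (raw : String) (rest : List String)
    (frames : List (String × String × String))
    (pending : Option (String × String × String)) (code_set : Bool) :
    pvBLoop (raw :: rest) frames pending code_set =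
      (if PySem.Str.startswith (PySem.Str.strip raw) "File " then
        pvBLoop rest (frames ++ pending.toList)
          (some ((pvParseFileLine (PySem.Str.strip raw)).1,
                 (pvParseFileLine (PySem.Str.strip raw)).2, "")) false
       else
        match pending, code_set with
        | some p, false => pvBLoop rest frames (some (p.1, p.2.1, PySem.Str.strip raw)) true
        | _, _ => pvBLoop rest frames pending code_set) := by
  rw [pvBLoop.eq_def]

-- what pvBLoop's remaining run produces from a given state, expressed through pvALoop
def pvStateSpec (pending : Option (String × String × String)) (code_set : Bool)
    (lines : List String) : List (String × String × String) :=
  match pending, code_set with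
  | none, _ => pvALoop lines
  | some q, true => q :: pvALoop lines
  | some q, false =>
    match lines with
    | [] => [q]
    | next :: rest' =>
      if !(PySem.Str.startswith (PySem.Str.strip next) "File ") then
        (q.1, q.2.1, PySem.Str.strip next) :: pvALoop rest'
      else
        q :: pvALoop (next :: rest')

-- rfl-unfoldings of pvStateSpec per state
theorem pvStateSpec_none (cs : Bool) (lines : List String) :
    pvStateSpec none cs lines = pvALoop lines := rfl
theorem pvStateSpec_some_true (q : String × String × String) (lines : List String) :
    pvStateSpec (some q) true lines = q :: pvALoop lines := rfl
theorem pvStateSpec_some_false_nil (q : String × String × String) :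
    pvStateSpec (some q) false [] = [q] := rfl
theorem pvStateSpec_some_false_cons (q : String × String × String) (next : String)
    (rest' : List String) :
    pvStateSpec (some q) false (next :: rest') =
      if !(PySem.Str.startswith (PySem.Str.strip next) "File ") then
        (q.1, q.2.1, PySem.Str.strip next) :: pvALoop rest'
      else q :: pvALoop (next :: rest') := rfl

theorem pvBLoop_eq (lines : List String) :
    ∀ (frames : List (String × String × String)) pending code_set,
    pvBLoop lines frames pending code_set = frames ++ pvStateSpec pending code_set lines := by
  induction lines with
  | nil =>
    intro frames pending code_set
    cases pending <;> cases code_set <;> simp [pvBLoop, pvStateSpec, pvALoop]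
  | cons raw rest ih =>
    intro frames pending code_set
    rw [pvBLoop_cons]
    by_cases hF : PySem.Str.startswith (PySem.Str.strip raw) "File " = true
    · rw [if_pos hF, ih]
      have hF' := hF; simp at hF'
      cases rest with
      | nil =>
        rw [pvStateSpec_some_false_nil]
        cases pending with
        | none =>
          rw [pvStateSpec_none]
          conv_rhs => rw [pvALoop_cons]
          simp [hF', show pvALoop ([] : List String) = [] from rfl]
        | some q =>
          cases code_set with
          | true =>
            rw [pvStateSpec_some_true]
            conv_rhs => rw [pvALoop_cons]
            simp [hF', show pvALoop ([] : List String) = [] from rfl]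
          | false =>
            rw [pvStateSpec_some_false_cons, hF]
            conv_rhs => rw [pvALoop_cons]
            simp [hF', show pvALoop ([] : List String) = [] from rfl]
      | cons next rest' =>
        rw [pvStateSpec_some_false_cons]
        by_cases hN : PySem.Str.startswith (PySem.Str.strip next) "File " = true
        · have hN' := hN; simp at hN'
          cases pending with
          | none =>
            rw [pvStateSpec_none]
            conv_rhs => rw [pvALoop_cons]
            simp [hF', hN']
          | some q =>
            cases code_set with
            | true =>
              rw [pvStateSpec_some_true]
              conv_rhs => rw [pvALoop_cons]
              simp [hF', hN']
            | false =>
              rw [pvStateSpec_some_false_cons, hF, Bool.not_true, if_neg (show ¬(false = true) by simp)]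
              conv_rhs => rw [pvALoop_cons]
              simp [hF', hN']
        · rw [Bool.not_eq_true] at hN
          have hN' := hN; simp at hN'
          cases pending with
          | none =>
            rw [pvStateSpec_none]
            conv_rhs => rw [pvALoop_cons]
            simp [hF', hN']
          | some q =>
            cases code_set with
            | true =>
              rw [pvStateSpec_some_true]
              conv_rhs => rw [pvALoop_cons]
              simp [hF', hN']
            | false =>
              rw [pvStateSpec_some_false_cons, hF, Bool.not_true, if_neg (show ¬(false = true) by simp)]
              conv_rhs => rw [pvALoop_cons]
              simp [hF', hN']
    · rw [Bool.not_eq_true] at hF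
      rw [if_neg (by rw [hF]; simp)]
      cases pending with
      | none =>
        cases code_set <;>
          (simp only [ih];
           rw [pvStateSpec_none, pvStateSpec_none];
           conv_rhs => rw [pvALoop_cons];
           rw [if_neg (by rw [hF]; simp)])
      | some q =>
        cases code_set with
        | true =>
          simp only [ih]
          rw [pvStateSpec_some_true, pvStateSpec_some_true]
          conv_rhs => rw [pvALoop_cons]
          rw [if_neg (by rw [hF]; simp)]
        | false =>
          simp only [ih]
          rw [pvStateSpec_some_true, pvStateSpec_some_false_cons, hF, Bool.not_false,
            if_pos rfl]

-- ===== VERDICT (by name: the statement is the Claim_ definition above) =====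
theorem parse_stack_frames_py_spec : Claim_equal_parse_stack_frames_py := by
  intro stack_trace _
  unfold Spec_parse_stack_frames_py parse_stack_frames_py parse_stack_frames_py_alt
  rw [pvBLoop_eq, pvStateSpec_none, List.nil_append]
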